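-- pv_equiv track=rewrite | github.com/hoanthiennguyen/SolveEquation | atom.py | find_sign
-- ===== SOURCE A (Python) =====
-- def find_sign(expression):
--     sign = 1
--     offset = 0
--     while offset < len(expression):
--         if expression[offset] == "+":
--             sign = sign
--         elif expression[offset] == "-":
--             sign = -sign
--         else:
--             break
--         offset = offset + 1
--     return sign, offset
-- ===== SOURCE B (Python) =====
-- from itertools import takewhile
--
-- def find_sign(expression):
--     prefix = "".join(takewhile(lambda c: c in "+-", expression))
--     offset = len(prefix)
--     sign = -1 if prefix.count("-") % 2 == 1 else 1
--     return sign, offset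
-- ===== Notes on version B (the rewrite author's own statement) =====
-- stated objective: simpler
-- what changed: Replaces the lockstep sign-flipping loop by two separate steps: extract the leading run of sign characters with takewhile, then derive the sign from the parity of the number of minus characters in that prefix.
import Mathlib
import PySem

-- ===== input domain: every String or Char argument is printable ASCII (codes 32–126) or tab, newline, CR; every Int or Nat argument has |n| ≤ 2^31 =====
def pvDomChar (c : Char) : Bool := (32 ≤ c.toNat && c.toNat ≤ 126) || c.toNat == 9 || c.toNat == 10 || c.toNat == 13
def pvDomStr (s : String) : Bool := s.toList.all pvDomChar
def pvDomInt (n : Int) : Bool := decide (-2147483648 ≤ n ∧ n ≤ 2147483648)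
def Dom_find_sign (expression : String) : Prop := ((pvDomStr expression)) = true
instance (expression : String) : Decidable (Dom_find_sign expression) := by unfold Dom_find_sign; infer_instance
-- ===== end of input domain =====

-- B separates the work into two steps (takeWhile pfx, then '-'-count parity) instead of A's lockstep sign-flipping loop; objective: simpler decomposition.


-- ===== PORT A =====
-- while loop over the characters, flipping a running sign
def findSignLoop : List Char → Int → Int → Int × Int
  | [], sign, offset => (sign, offset)
  | c :: rest, sign, offset =>
    if c = '+' then findSignLoop rest sign (offset + 1)
    else if c = '-' then findSignLoop rest (-sign) (offset + 1)
    else (sign, offset)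

def find_sign (expression : String) : Int × Int :=
  findSignLoop expression.toList 1 0

-- ===== PORT B =====
def find_sign_alt (expression : String) : Int × Int :=
  let pfx := expression.toList.takeWhile (fun c => c = '+' || c = '-')
  let offset : Int := pfx.length
  let sign : Int := if pfx.count '-' % 2 = 1 then -1 else 1
  (sign, offset)

-- ===== PRECONDITION & SPEC =====
def Spec_find_sign (expression : String) (out : Int × Int) : Prop := out = find_sign_alt expression
instance (expression : String) (out : Int × Int) : Decidable (Spec_find_sign expression out) := by unfold Spec_find_sign; infer_instance

-- ===== CLAIM (what is proved, stated in full; the proofs are below) =====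
def Claim_equal_find_sign : Prop := ∀ (expression : String), Dom_find_sign expression → Spec_find_sign expression (find_sign expression)

-- ===== LEMMAS AND PROOFS =====
theorem findSignLoop_eq (l : List Char) (s o : Int) :
    findSignLoop l s o =
      (s * (if (l.takeWhile (fun c => c = '+' || c = '-')).count '-' % 2 = 1 then -1 else 1),
       o + ((l.takeWhile (fun c => c = '+' || c = '-')).length : Int)) := by
  induction l generalizing s o with
  | nil => simp [findSignLoop]
  | cons c rest ih =>
    by_cases hp : c = '+'
    · subst hp
      simp [findSignLoop, List.takeWhile, ih]
      omega
    · by_cases hm : c = '-'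
      · subst hm
        simp [findSignLoop, List.takeWhile, ih]
        constructor
        · split_ifs with h1 h2 h2
          · exfalso; omega
          · ring
          · ring
          · exfalso; omega
        · omega
      · simp [findSignLoop, hp, hm, List.takeWhile]

theorem find_sign_spec : Claim_equal_find_sign := by
  intro e _
  unfold Spec_find_sign find_sign find_sign_alt
  rw [findSignLoop_eq]
  simp
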